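-- pv_equiv track=rewrite | github.com/Zhenye-Na/lintcode | Two_Pointers/1487.Judging Triangle/Solution.py | judgingTriangle
-- ===== SOURCE A (Python) =====
-- def judgingTriangle(arr):
--     # Write your code here
--     if not arr or len(arr) == 0:
--         return "no"
--
--     n = len(arr)
--     for i in range(2, n):
--         left, right = 0, i - 1
--         while left < right:
--             if arr[left] + arr[right] > arr[i]:
--                 return "yes"
--             else:
--                 left += 1
--
--     return "no"
-- ===== SOURCE B (Python) =====
-- def judgingTriangle(arr):
--     # One linear pass: keep the running maximum of arr[0..i-2]; a pair
--     # (k, i-1) with arr[k] + arr[i-1] > arr[i] exists iff the maximum works.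
--     if len(arr) < 3:
--         return "no"
--     it = iter(arr)
--     best = next(it)
--     prev = next(it)
--     for cur in it:
--         if best + prev > cur:
--             return "yes"
--         if prev > best:
--             best = prev
--         prev = cur
--     return "no"
-- ===== Notes on version B (the rewrite author's own statement) =====
-- stated objective: alternative
-- what changed: Replace the nested loop (for each i, scan all left < i-1 against arr[i-1]) by one linear pass that maintains the running prefix maximum and tests max(arr[0..i-2]) + arr[i-1] > arr[i].
import Mathlib
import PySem

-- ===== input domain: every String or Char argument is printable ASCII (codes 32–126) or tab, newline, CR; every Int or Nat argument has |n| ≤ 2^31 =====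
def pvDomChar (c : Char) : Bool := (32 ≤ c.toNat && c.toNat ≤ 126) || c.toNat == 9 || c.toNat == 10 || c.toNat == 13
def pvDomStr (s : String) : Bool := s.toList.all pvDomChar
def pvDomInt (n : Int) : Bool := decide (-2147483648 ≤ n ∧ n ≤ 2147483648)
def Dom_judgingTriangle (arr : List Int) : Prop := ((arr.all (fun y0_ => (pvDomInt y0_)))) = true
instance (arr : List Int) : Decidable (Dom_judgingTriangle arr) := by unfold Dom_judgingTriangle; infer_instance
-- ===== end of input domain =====

-- B replaces A's nested scan by one linear pass keeping a running prefix maximum.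
-- ===== PORT A =====
-- the inner 'while left < right' loop of A (right never changes; only left increments)
def jtWhileA (arr : List Int) (i left right : Int) : Bool :=
  if _h : left < right then
    if (PySem.List.pyGet? arr left).getD 0 + (PySem.List.pyGet? arr right).getD 0 >
       (PySem.List.pyGet? arr i).getD 0 then true
    else jtWhileA arr i (left + 1) right
  else false
termination_by (right - left).toNat
decreasing_by omega

def judgingTriangle (arr : List Int) : String :=
  if arr = [] ∨ (arr.length : Int) = 0 then "no"
  else
    let n : Int := arr.length
    -- the outer 'for i in range(2, n)' with early return "yes"
    if (PySem.List.pyRange 2 n 1).any (fun i => jtWhileA arr i 0 (i - 1)) then "yes" else "no"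

-- ===== PORT B =====
-- the 'for cur in arr[2:]' loop of B, threading (best, prev)
def jtLoopB (best prev : Int) : List Int → Bool
  | [] => false
  | cur :: rest => if best + prev > cur then true else jtLoopB (max best prev) cur rest

def judgingTriangle_alt (arr : List Int) : String :=
  match arr with
  | a :: b :: rest => if jtLoopB a b rest then "yes" else "no"
  | _ => "no"

-- ===== PRECONDITION & SPEC =====
def Spec_judgingTriangle (arr : List Int) (out : String) : Prop := out = judgingTriangle_alt arr
instance (arr : List Int) (out : String) : Decidable (Spec_judgingTriangle arr out) := by unfold Spec_judgingTriangle; infer_instance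

-- ===== CLAIM (what is proved, stated in full; the proofs are below) =====
def Claim_equal_judgingTriangle : Prop := ∀ (arr : List Int), Dom_judgingTriangle arr → Spec_judgingTriangle arr (judgingTriangle arr)

-- ===== LEMMAS AND PROOFS =====

-- proof-side reformulation of B's loop: carry the whole prefix instead of its maximum
def jtLoopE (p : List Int) (prev : Int) : List Int → Bool
  | [] => false
  | cur :: rest => if p.any (fun x => x + prev > cur) then true else jtLoopE (p ++ [prev]) cur rest

theorem jtLoopB_eq_loopE (l : List Int) :
    ∀ (p : List Int) (best prev : Int), (∀ x ∈ p, x ≤ best) → best ∈ p →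
      jtLoopB best prev l = jtLoopE p prev l := by
  induction l with
  | nil => intro p best prev _ _; rfl
  | cons cur rest ih =>
    intro p best prev hub hmem
    simp only [jtLoopB, jtLoopE]
    have hany : (p.any (fun x => x + prev > cur)) = (decide (best + prev > cur)) := by
      by_cases h : best + prev > cur
      · simp only [h, decide_true]
        exact List.any_eq_true.mpr ⟨best, hmem, by simpa using h⟩
      · simp only [h, decide_false]
        simp only [List.any_eq_false]
        intro x hx
        have := hub x hx
        simp only [decide_eq_true_eq, gt_iff_lt, not_lt] at *
        omega
    rw [hany]
    by_cases h : best + prev > cur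
    · simp [h]
    · simp only [h, decide_false, Bool.false_eq_true, if_false]
      apply ih
      · intro x hx
        rcases List.mem_append.mp hx with hx | hx
        · exact le_trans (hub x hx) (le_max_left _ _)
        · simp only [List.mem_singleton] at hx; subst hx; exact le_max_right _ _
      · rcases le_total best prev with h' | h'
        · rw [max_eq_right h']; simp
        · rw [max_eq_left h']; exact List.mem_append_left _ hmem

-- characterization of A's inner while loop
theorem jtWhileA_iff (arr : List Int) (i right left : Int) :
    jtWhileA arr i left right = true ↔
      ∃ k : Int, left ≤ k ∧ k < right ∧
        (PySem.List.pyGet? arr k).getD 0 + (PySem.List.pyGet? arr right).getD 0 >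
          (PySem.List.pyGet? arr i).getD 0 := by
  rw [jtWhileA]
  split
  · rename_i hlr
    split
    · rename_i hc
      constructor
      · intro _; exact ⟨left, le_refl _, hlr, hc⟩
      · intro _; rfl
    · rename_i hc
      rw [jtWhileA_iff arr i right (left + 1)]
      constructor
      · rintro ⟨k, h1, h2, h3⟩; exact ⟨k, by omega, h2, h3⟩
      · rintro ⟨k, h1, h2, h3⟩
        refine ⟨k, ?_, h2, h3⟩
        rcases eq_or_lt_of_le h1 with h | h
        · exact absurd (h ▸ h3) hc
        · omega
  · rename_i hlr
    simp only [Bool.false_eq_true, false_iff]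
    rintro ⟨k, h1, h2, _⟩; omega
termination_by (right - left).toNat
decreasing_by omega

-- characterization of the proof-side loopE
theorem jtLoopE_iff (l : List Int) :
    ∀ (p : List Int) (prev : Int), jtLoopE p prev l = true ↔
      ∃ j : Nat, j < l.length ∧
        ∃ x ∈ p ++ (prev :: l).take j, x + (prev :: l).getD j 0 > l.getD j 0 := by
  induction l with
  | nil => intro p prev; simp [jtLoopE]
  | cons cur rest ih =>
    intro p prev
    simp only [jtLoopE]
    cases hpa : p.any (fun x => x + prev > cur) with
    | true =>
      simp only [if_true, true_iff]
      rcases List.any_eq_true.mp hpa with ⟨x, hx, hcond⟩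
      exact ⟨0, by simp, x, by simpa using hx, by simpa using hcond⟩
    | false =>
      simp only [Bool.false_eq_true, if_false]
      rw [ih (p ++ [prev]) cur]
      constructor
      · rintro ⟨j, hj, x, hx, hcond⟩
        refine ⟨j + 1, by simpa using Nat.succ_lt_succ hj, x, ?_, ?_⟩
        · simpa [List.take_succ_cons, List.append_assoc] using hx
        · simpa using hcond
      · rintro ⟨j, hj, x, hx, hcond⟩
        cases j with
        | zero =>
          exfalso
          have : p.any (fun x => x + prev > cur) = true :=
            List.any_eq_true.mpr ⟨x, by simpa using hx, by simpa using hcond⟩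
          rw [hpa] at this; exact Bool.false_ne_true this
        | succ j =>
          refine ⟨j, by simpa using Nat.lt_of_succ_lt_succ hj, x, ?_, ?_⟩
          · simpa [List.take_succ_cons, List.append_assoc] using hx
          · simpa using hcond

-- pyGet? at a Nat-cast in-range index is getD
theorem jtGetNat (arr : List Int) (m : Nat) :
    (PySem.List.pyGet? arr (m : Int)).getD 0 = arr.getD m 0 := by
  simp [PySem.List.pyGet?_natCast, List.getD_eq_getElem?_getD]

theorem judgingTriangle_spec_aux (arr : List Int) :
    judgingTriangle arr = judgingTriangle_alt arr := by
  match arr with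
  | [] => rfl
  | [a] => simp [judgingTriangle, judgingTriangle_alt, PySem.List.pyRange_one_eq_nil]
  | [a, b] =>
    simp [judgingTriangle, judgingTriangle_alt, jtLoopB,
      PySem.List.pyRange_one_eq_nil (by norm_num : (2:Int) ≤ 2)]
  | a :: b :: c :: rest =>
    set l := c :: rest with hl
    have hlen : ((a :: b :: l).length : Int) = (l.length : Int) + 2 := by simp; ring
    have hA : ((PySem.List.pyRange 2 ((a :: b :: l).length : Int) 1).any
        (fun i => jtWhileA (a :: b :: l) i 0 (i - 1)) = true) ↔
        (jtLoopB a b l = true) := by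
      rw [jtLoopB_eq_loopE l [a] a b (by simp) (by simp)]
      rw [jtLoopE_iff l [a] b]
      rw [List.any_eq_true]
      constructor
      · rintro ⟨i, hi, hw⟩
        rw [PySem.List.mem_pyRange_one] at hi
        rw [jtWhileA_iff] at hw
        rcases hw with ⟨k, hk0, hkr, hcond⟩
        obtain ⟨hi2, hin⟩ := hi
        rw [hlen] at hin
        set j : Nat := (i - 2).toNat with hj
        have hij : i = (j : Int) + 2 := by omega
        have hjl : j < l.length := by omega
        have hkj : k = ((k.toNat : Nat) : Int) := by omega
        have hkjb : k.toNat < j + 1 := by omega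
        refine ⟨j, hjl, (a :: b :: l).getD k.toNat 0, ?_, ?_⟩
        · -- membership in [a] ++ (b::l).take j = (a::b::l).take (j+1)
          have hmem : (a :: b :: l).getD k.toNat 0 ∈ (a :: b :: l).take (j + 1) := by
            have hkl : k.toNat < (a :: b :: l).length := by simp; omega
            have h1 : (a :: b :: l).getD k.toNat 0 = (a :: b :: l)[k.toNat] :=
              List.getD_eq_getElem _ _ hkl
            rw [h1]
            have : (a :: b :: l)[k.toNat] = ((a :: b :: l).take (j + 1))[k.toNat]'(by
              simp [List.length_take]; omega) := List.getElem_take.symm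
            rw [this]
            exact List.getElem_mem _
          simpa [List.take_succ_cons] using hmem
        · have e1 : (PySem.List.pyGet? (a :: b :: l) k).getD 0 = (a :: b :: l).getD k.toNat 0 := by
            have h := jtGetNat (a :: b :: l) k.toNat
            rw [← hkj] at h
            exact h
          have e2 : (PySem.List.pyGet? (a :: b :: l) (i - 1)).getD 0 = (b :: l).getD j 0 := by
            have : i - 1 = ((j + 1 : Nat) : Int) := by omega
            rw [this, jtGetNat]
            simp
          have e3 : (PySem.List.pyGet? (a :: b :: l) i).getD 0 = l.getD j 0 := by
            have : i = ((j + 2 : Nat) : Int) := by omega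
            rw [this, jtGetNat]
            simp
          rw [e1, e2, e3] at hcond
          exact hcond
      · rintro ⟨j, hjl, x, hx, hcond⟩
        refine ⟨(j : Int) + 2, ?_, ?_⟩
        · rw [PySem.List.mem_pyRange_one, hlen]; omega
        · rw [jtWhileA_iff]
          -- turn the membership into an index k ≤ j
          have hx' : x ∈ (a :: b :: l).take (j + 1) := by
            simpa [List.take_succ_cons] using hx
          rcases List.mem_iff_getElem.mp hx' with ⟨k, hk, hxk⟩
          have hkb : k < j + 1 := by simp [List.length_take] at hk; omega
          have hkl : k < (a :: b :: l).length := by simp; omega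
          refine ⟨(k : Int), by omega, by omega, ?_⟩
          have e1 : (PySem.List.pyGet? (a :: b :: l) (k : Int)).getD 0 = x := by
            rw [jtGetNat, List.getD_eq_getElem _ _ hkl, ← hxk]
            exact List.getElem_take.symm
          have e2 : (PySem.List.pyGet? (a :: b :: l) ((j : Int) + 2 - 1)).getD 0 = (b :: l).getD j 0 := by
            have : (j : Int) + 2 - 1 = ((j + 1 : Nat) : Int) := by omega
            rw [this, jtGetNat]
            simp
          have e3 : (PySem.List.pyGet? (a :: b :: l) ((j : Int) + 2)).getD 0 = l.getD j 0 := by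
            have : (j : Int) + 2 = ((j + 2 : Nat) : Int) := by omega
            rw [this, jtGetNat]
            simp
          rw [e1, e2, e3]
          exact hcond
    have hne : ¬((a :: b :: l) = [] ∨ (((a :: b :: l).length : Int) = 0)) := by simp; omega
    rw [judgingTriangle, if_neg hne]
    show (if (PySem.List.pyRange 2 ((a :: b :: l).length : Int) 1).any
        (fun i => jtWhileA (a :: b :: l) i 0 (i - 1)) then "yes" else "no")
      = (if jtLoopB a b l then "yes" else "no")
    by_cases hB : jtLoopB a b l = true
    · rw [hA.mpr hB, hB]
    · have h1 : ((PySem.List.pyRange 2 ((a :: b :: l).length : Int) 1).any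
        (fun i => jtWhileA (a :: b :: l) i 0 (i - 1))) = false :=
        Bool.eq_false_iff.mpr (fun h => hB (hA.mp h))
      have h2 : jtLoopB a b l = false := Bool.eq_false_iff.mpr hB
      rw [h1, h2]

-- ===== VERDICT (by name: the statement is the Claim_ definition above) =====
theorem judgingTriangle_spec : Claim_equal_judgingTriangle := by
  intro arr _
  unfold Spec_judgingTriangle
  exact judgingTriangle_spec_aux arr
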